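-- pv_equiv track=rewrite | github.com/jasonzhang1998/LC | Job/Contest/2022_6_26/2321.py | maximumsSplicedArray
-- ===== SOURCE A (Python) =====
-- from typing import List
--
-- def maximumsSplicedArray(nums1: List[int], nums2: List[int]) -> int:
--     def solve(numsa, numsb):
--         n = len(numsa)
--         diff = [0] * n
--         for i in range(n):
--             diff[i] = numsb[i] - numsa[i]
--         ans = 0
--         cur = diff[0]
--         for i in range(1, n):
--             if cur > 0:
--                 cur += diff[i]
--             else:
--                 cur = diff[i]
--             ans = max(ans, cur)
--         return ans + sum(numsa)
--
--     return max(solve(nums1, nums2), solve(nums2, nums1))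
-- ===== SOURCE B (Python) =====
-- def maximumsSplicedArray(nums1, nums2):
--     # Prefix-sum formulation: the best swap gain for direction (a -> b) is the
--     # maximum over prefixes of (prefix_total - minimum_earlier_prefix_total),
--     # floored at 0 by starting all accumulators at 0 (= swap nothing).
--     def solve(numsa, numsb):
--         best = pre = minpre = 0
--         for x, y in zip(numsa, numsb):
--             pre += y - x
--             best = max(best, pre - minpre)
--             minpre = min(minpre, pre)
--         return best + sum(numsa)
--
--     return max(solve(nums1, nums2), solve(nums2, nums1))
-- ===== Notes on version B (the rewrite author's own statement) =====
-- stated objective: alternative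
-- what changed: Replaces Kadane's restart recurrence (cur = diff[i] or cur+diff[i]) over an explicitly prebuilt diff array with a single zip pass keeping a running prefix sum and its minimum (gain = pre - minpre, floored at 0); the diff array and the restart branch disappear, and the no-swap floor makes the missed single-element-at-index-0 subarray irrelevant because the complementary direction always recovers it.
-- outside the precondition, e.g. on maximumsSplicedArray([], []): A raises IndexError, B returns 0; on maximumsSplicedArray([1, 2], [5]): A raises IndexError, B returns 7
import Mathlib
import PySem

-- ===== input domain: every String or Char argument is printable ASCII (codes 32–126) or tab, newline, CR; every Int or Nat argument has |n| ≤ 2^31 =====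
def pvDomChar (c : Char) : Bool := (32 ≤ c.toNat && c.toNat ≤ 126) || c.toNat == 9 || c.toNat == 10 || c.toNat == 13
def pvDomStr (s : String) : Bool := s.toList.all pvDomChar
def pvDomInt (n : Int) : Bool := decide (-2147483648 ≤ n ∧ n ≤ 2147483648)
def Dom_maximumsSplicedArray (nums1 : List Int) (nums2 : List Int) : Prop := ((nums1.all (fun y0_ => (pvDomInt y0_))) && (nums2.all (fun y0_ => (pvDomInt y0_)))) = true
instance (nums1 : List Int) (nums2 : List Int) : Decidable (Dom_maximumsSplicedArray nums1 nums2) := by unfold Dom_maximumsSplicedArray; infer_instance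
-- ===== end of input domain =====

-- B replaces the explicit diff array + Kadane restart recurrence by a single
-- prefix-sum/min-prefix pass over the zipped lists; objective: alternative (same cost).

-- ===== PORT A =====
-- solve(numsa, numsb): builds diff, runs the Kadane-style loop from index 1, adds sum(numsa).
-- Indexing is ported with pyGetD (in range under Pre_; diff[0] raises on empty input, excluded by Pre_).
def pvSolveA (numsa : List Int) (numsb : List Int) : Int :=
  let n : Int := numsa.length
  let diff : List Int := (PySem.List.pyRange 0 n 1).map
    (fun i => PySem.List.pyGetD numsb i 0 - PySem.List.pyGetD numsa i 0)
  let cur : Int := PySem.List.pyGetD diff 0 0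
  let r := (PySem.List.pyRange 1 n 1).foldl
    (fun (s : Int × Int) i =>
      let c := if s.2 > 0 then s.2 + PySem.List.pyGetD diff i 0 else PySem.List.pyGetD diff i 0
      (max s.1 c, c)) (0, cur)
  r.1 + numsa.sum

def maximumsSplicedArray (nums1 : List Int) (nums2 : List Int) : Int :=
  max (pvSolveA nums1 nums2) (pvSolveA nums2 nums1)

-- ===== PORT B =====
-- solve(numsa, numsb): one pass over zip keeping (best, pre, minpre), adds sum(numsa).
def pvSolveB (numsa : List Int) (numsb : List Int) : Int :=
  let r := (numsa.zip numsb).foldl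
    (fun (s : Int × Int × Int) p =>
      let pre := s.2.1 + (p.2 - p.1)
      (max s.1 (pre - s.2.2), pre, min s.2.2 pre)) (0, 0, 0)
  r.1 + numsa.sum

def maximumsSplicedArray_alt (nums1 : List Int) (nums2 : List Int) : Int :=
  max (pvSolveB nums1 nums2) (pvSolveB nums2 nums1)

-- ===== PRECONDITION & SPEC =====
-- Pre_ excludes exactly the inputs on which A raises IndexError: unequal lengths
-- (some numsb[i]/numsa[i] access is out of range in one direction) and empty lists (diff[0]).
def Pre_maximumsSplicedArray (nums1 : List Int) (nums2 : List Int) : Prop :=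
  nums1.length = nums2.length ∧ nums1 ≠ []
instance (nums1 : List Int) (nums2 : List Int) : Decidable (Pre_maximumsSplicedArray nums1 nums2) := by
  unfold Pre_maximumsSplicedArray; infer_instance

def pvWitness_maximumsSplicedArray : List Int × List Int := ([1, -3, 5], [4, 2, -1])

def Spec_maximumsSplicedArray (nums1 : List Int) (nums2 : List Int) (out : Int) : Prop := out = maximumsSplicedArray_alt nums1 nums2
instance (nums1 : List Int) (nums2 : List Int) (out : Int) : Decidable (Spec_maximumsSplicedArray nums1 nums2 out) := by unfold Spec_maximumsSplicedArray; infer_instance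

-- ===== CLAIM (what is proved, stated in full; the proofs are below) =====
def Claim_equal_maximumsSplicedArray : Prop := ∀ (nums1 : List Int) (nums2 : List Int), Dom_maximumsSplicedArray nums1 nums2 → Pre_maximumsSplicedArray nums1 nums2 → Spec_maximumsSplicedArray nums1 nums2 (maximumsSplicedArray nums1 nums2)

-- ===== LEMMAS AND PROOFS =====

-- Clean fold forms of the two inner loops, over the plain diff list.
def pvAfold (s : Int × Int) (t : List Int) : Int × Int :=
  t.foldl (fun s x => let c := if s.2 > 0 then s.2 + x else x; (max s.1 c, c)) s

def pvBfold (s : Int × Int × Int) (t : List Int) : Int × Int × Int :=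
  t.foldl (fun s x =>
    let pre := s.2.1 + x
    (max s.1 (pre - s.2.2), pre, min s.2.2 pre)) s

def pvDiff (a b : List Int) : List Int := (a.zip b).map (fun p => p.2 - p.1)

theorem pvAfold_cons (s : Int × Int) (x : Int) (t : List Int) :
    pvAfold s (x :: t) = pvAfold (max s.1 (if s.2 > 0 then s.2 + x else x),
      if s.2 > 0 then s.2 + x else x) t := rfl

theorem pvBfold_cons (s : Int × Int × Int) (x : Int) (t : List Int) :
    pvBfold s (x :: t) = pvBfold (max s.1 (s.2.1 + x - s.2.2), s.2.1 + x, min s.2.2 (s.2.1 + x)) t := rfl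

theorem ite_eq_max (c x : Int) : (if c > 0 then c + x else x) = max c 0 + x := by
  split_ifs with h <;> omega

-- port A's solve equals the clean fold on diff (under Pre_).
theorem pvSolveA_eq (a b : List Int) (hlen : a.length = b.length) (hne : a ≠ []) :
    pvSolveA a b = (pvAfold (0, (pvDiff a b).headI) ((pvDiff a b).tail)).1 + a.sum := by
  have hd : (PySem.List.pyRange 0 (a.length : Int) 1).map
      (fun i => PySem.List.pyGetD b i 0 - PySem.List.pyGetD a i 0) = pvDiff a b := by
    have hlen' : (pvDiff a b).length = a.length := by
      simp [pvDiff, List.length_zip, hlen]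
    apply List.ext_getElem
    · simp [PySem.List.length_pyRange_one, hlen']
    · intro k h1 h2
      have hk : k < a.length := by
        simpa [PySem.List.length_pyRange_one] using h1
      have hkb : k < b.length := hlen ▸ hk
      simp [PySem.List.getElem_pyRange_one, pvDiff,
        PySem.List.pyGetD_natCast, List.getD_eq_getElem?_getD,
        hk, hkb, List.getElem_zip]
  have hdlen : (pvDiff a b).length = a.length := by simp [pvDiff, List.length_zip, hlen]
  simp only [pvSolveA]
  rw [hd]
  have hfold := PySem.List.foldl_pyRange_pyGetD (xs := pvDiff a b) (a := 1) (d := 0)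
    (f := fun (s : Int × Int) x =>
      (max s.1 (if s.2 > 0 then s.2 + x else x), if s.2 > 0 then s.2 + x else x))
    (init := ((0 : Int), PySem.List.pyGetD (pvDiff a b) 0 0)) (by omega)
  simp only [PySem.List.len_eq, hdlen] at hfold
  have h0 : PySem.List.pyGetD (pvDiff a b) 0 0 = (pvDiff a b).headI := by
    cases hab : pvDiff a b with
    | nil =>
      exfalso
      have : a.length = 0 := by rw [← hdlen, hab]; rfl
      exact hne (List.eq_nil_of_length_eq_zero this)
    | cons x t => simp [PySem.List.pyGetD_zero_cons]
  rw [hfold, h0]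
  simp [pvAfold, List.drop_one]

-- port B's solve equals the clean fold on diff.
theorem pvSolveB_eq (a b : List Int) :
    pvSolveB a b = (pvBfold (0, 0, 0) (pvDiff a b)).1 + a.sum := by
  unfold pvSolveB pvBfold pvDiff
  rw [List.foldl_map]

-- prefix-min fold vs Kadane fold: generalized invariant.
theorem pvBA (t : List Int) : ∀ (a c p m K : Int), p - m = max c 0 →
    (pvBfold (max a K, p, m) t).1 = max ((pvAfold (a, c) t).1) K := by
  induction t with
  | nil => intro a c p m K h; simp [pvBfold, pvAfold]
  | cons x t ih =>
    intro a c p m K h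
    rw [pvBfold_cons, pvAfold_cons, ite_eq_max]
    have h1 : max (max a K) (p + x - m) = max (max a (max c 0 + x)) K := by omega
    rw [h1]
    exact ih (max a (max c 0 + x)) (max c 0 + x) (p + x) (min m (p + x)) K (by omega)

-- B's fold over h::t versus A's fold over t (starting cur = h).
theorem pvB_eq_A (h : Int) (t : List Int) :
    (pvBfold (0, 0, 0) (h :: t)).1 = max ((pvAfold (0, h) t).1) (max h 0) := by
  rw [pvBfold_cons]
  rw [show max (0 : Int) (0 + h - 0) = max 0 (max h 0) from by omega]
  exact pvBA t 0 h (0 + h) (min 0 (0 + h)) (max h 0) (by omega)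

-- ans is monotone from its start.
theorem pvAfold_fst_ge (t : List Int) : ∀ (a c : Int), a ≤ (pvAfold (a, c) t).1 := by
  induction t with
  | nil => intro a c; simp [pvAfold]
  | cons x t ih =>
    intro a c
    rw [pvAfold_cons]
    exact le_trans (le_max_left _ _) (ih _ _)

-- final cur ≥ initial cur + sum.
theorem pvAfold_snd_ge (t : List Int) : ∀ (a c : Int), c + t.sum ≤ (pvAfold (a, c) t).2 := by
  induction t with
  | nil => intro a c; simp [pvAfold]
  | cons x t ih =>
    intro a c
    rw [pvAfold_cons, ite_eq_max]
    have := ih (max a (max c 0 + x)) (max c 0 + x)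
    simp only [List.sum_cons]
    omega

-- on a nonempty list ans ≥ final cur.
theorem pvAfold_fst_ge_snd (t : List Int) (ht : t ≠ []) : ∀ (a c : Int),
    (pvAfold (a, c) t).2 ≤ (pvAfold (a, c) t).1 := by
  induction t with
  | nil => exact absurd rfl ht
  | cons x t ih =>
    intro a c
    rw [pvAfold_cons]
    cases t with
    | nil => simp [pvAfold]
    | cons y t' => exact ih (by simp) _ _

-- hence ans ≥ sum t (trivially for t = []).
theorem pvAfold_fst_ge_sum (t : List Int) (a c : Int) (ha : 0 ≤ a) :
    t.sum ≤ (pvAfold (a, c) t).1 := by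
  cases t with
  | nil => simpa [pvAfold] using ha
  | cons x t' =>
    rw [pvAfold_cons, ite_eq_max]
    have h1 := pvAfold_snd_ge t' (max a (max c 0 + x)) (max c 0 + x)
    cases t' with
    | nil =>
      simp only [pvAfold, List.foldl_nil, List.sum_cons, List.sum_nil] at *
      omega
    | cons y t'' =>
      have h2 := pvAfold_fst_ge_snd (y :: t'') (by simp) (max a (max c 0 + x)) (max c 0 + x)
      simp only [List.sum_cons] at *
      omega

theorem pvDiff_sum (a : List Int) : ∀ (b : List Int), a.length = b.length →
    (pvDiff a b).sum = b.sum - a.sum := by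
  induction a with
  | nil => intro b h; cases b with
    | nil => simp [pvDiff]
    | cons y t => simp at h
  | cons x t ih =>
    intro b h
    cases b with
    | nil => simp at h
    | cons y s =>
      have := ih s (by simpa using h)
      simp only [pvDiff, List.zip_cons_cons, List.map_cons, List.sum_cons] at *
      omega

theorem pvDiff_head (x y : Int) (t s : List Int) :
    pvDiff (x :: t) (y :: s) = (y - x) :: pvDiff t s := by simp [pvDiff]

-- one direction's B-solve never exceeds the max of the two A-solves.
theorem pvSolveB_le (a b : List Int) (hlen : a.length = b.length) (hne : a ≠ []) :
    pvSolveB a b ≤ max (pvSolveA a b) (pvSolveA b a) := by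
  have hne' : b ≠ [] := by
    intro hb; apply hne; rw [hb] at hlen; exact List.eq_nil_of_length_eq_zero hlen
  cases a with
  | nil => exact absurd rfl hne
  | cons x t =>
    cases b with
    | nil => exact absurd rfl hne'
    | cons y s =>
      have hlen' : t.length = s.length := by simpa using hlen
      rw [pvSolveB_eq, pvSolveA_eq _ _ hlen hne, pvSolveA_eq _ _ hlen.symm hne',
        pvDiff_head, pvDiff_head]
      simp only [List.headI, List.tail]
      rw [pvB_eq_A]
      -- notation
      set A1 := (pvAfold (0, y - x) (pvDiff t s)).1 with hA1
      set A2 := (pvAfold (0, x - y) (pvDiff s t)).1 with hA2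
      have g1 : 0 ≤ A1 := pvAfold_fst_ge (pvDiff t s) 0 (y - x)
      have g2 : 0 ≤ A2 := pvAfold_fst_ge (pvDiff s t) 0 (x - y)
      have g3 : (pvDiff s t).sum ≤ A2 := pvAfold_fst_ge_sum _ 0 _ (le_refl 0)
      have s1 : (pvDiff t s).sum = s.sum - t.sum := pvDiff_sum t s hlen'
      have s2 : (pvDiff s t).sum = t.sum - s.sum := pvDiff_sum s t hlen'.symm
      rw [s2] at g3
      have key : max (y - x) 0 + (x :: t).sum ≤
          max (A1 + (x :: t).sum) (A2 + (y :: s).sum) := by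
        simp only [List.sum_cons]
        rcases le_total (y - x) 0 with hyx | hyx
        · have : max (y - x) 0 = 0 := by omega
          rw [this]
          exact le_trans (by omega) (le_max_left _ _)
        · have : max (y - x) 0 = y - x := by omega
          rw [this]
          exact le_trans (by omega) (le_max_right _ _)
      have hmax : max A1 (max (y - x) 0) + (x :: t).sum =
          max (A1 + (x :: t).sum) (max (y - x) 0 + (x :: t).sum) := by
        omega
      rw [hmax]
      rcases le_total (A1 + (x :: t).sum) (max (y - x) 0 + (x :: t).sum) with hle | hle
      · rw [max_eq_right hle]; exact key
      · rw [max_eq_left hle]; exact le_max_left _ _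

-- each A-solve is ≤ its B-solve.
theorem pvSolveA_le (a b : List Int) (hlen : a.length = b.length) (hne : a ≠ []) :
    pvSolveA a b ≤ pvSolveB a b := by
  cases a with
  | nil => exact absurd rfl hne
  | cons x t =>
    cases b with
    | nil => simp at hlen
    | cons y s =>
      rw [pvSolveB_eq, pvSolveA_eq _ _ hlen hne, pvDiff_head]
      simp only [List.headI, List.tail]
      rw [pvB_eq_A]
      have := le_max_left ((pvAfold (0, y - x) (pvDiff t s)).1) (max (y - x) 0)
      omega

-- ===== VERDICT (by name: the statement is the Claim_ definition above) =====
theorem maximumsSplicedArray_spec : Claim_equal_maximumsSplicedArray := by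
  intro nums1 nums2 _ hpre
  obtain ⟨hlen, hne⟩ := hpre
  have hne' : nums2 ≠ [] := by
    intro hb; apply hne; rw [hb] at hlen; exact List.eq_nil_of_length_eq_zero hlen
  unfold Spec_maximumsSplicedArray maximumsSplicedArray maximumsSplicedArray_alt
  have u1 := pvSolveB_le nums1 nums2 hlen hne
  have u2 := pvSolveB_le nums2 nums1 hlen.symm hne'
  have l1 := pvSolveA_le nums1 nums2 hlen hne
  have l2 := pvSolveA_le nums2 nums1 hlen.symm hne'
  rw [max_comm (pvSolveA nums2 nums1)] at u2
  omega
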